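-- pv_equiv track=rewrite | github.com/BrandonLing/tkinter-examples | combinatorics.py | k_permutations
-- ===== SOURCE A (Python) =====
-- def k_permutations(items, n):
--     if n == 0:
--         yield []
--     else:
--         for i in range(len(items)):
--             for ss in k_permutations(items, n - 1):
--                 if (not items[i] in ss):
--                     yield [items[i]] + ss
-- ===== SOURCE B (Python) =====
-- def k_permutations(items, n):
--     # Backtracking: extend only valid prefixes, carrying the set of used values.
--     def extend(used, k):
--         if k == 0:
--             yield []
--         elif k > 0:
--             for x in items:
--                 if x not in used:
--                     for tail in extend(used | {x}, k - 1):
--                         yield [x] + tail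
--     yield from extend(frozenset(), n)
-- ===== Notes on version B (the rewrite author's own statement) =====
-- stated objective: alternative
-- what changed: A regenerates the full list of (n-1)-sequences for every candidate first element and filters it afterwards (generate-then-filter); B does top-down backtracking carrying a set of used values, extending only valid prefixes.
import Mathlib
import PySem

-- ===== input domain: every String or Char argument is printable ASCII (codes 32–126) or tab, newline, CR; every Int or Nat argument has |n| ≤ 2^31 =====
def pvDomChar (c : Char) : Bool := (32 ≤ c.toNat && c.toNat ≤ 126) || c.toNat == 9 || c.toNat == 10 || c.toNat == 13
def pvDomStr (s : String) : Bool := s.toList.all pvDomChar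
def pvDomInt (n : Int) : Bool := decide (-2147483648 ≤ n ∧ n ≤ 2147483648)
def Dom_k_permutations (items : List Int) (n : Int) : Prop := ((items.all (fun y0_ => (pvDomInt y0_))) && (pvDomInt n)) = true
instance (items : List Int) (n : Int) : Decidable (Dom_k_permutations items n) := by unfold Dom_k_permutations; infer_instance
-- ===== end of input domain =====

-- B replaces A's generate-all-then-filter recursion by backtracking that carries a set of
-- used values and extends only valid prefixes (objective: alternative algorithm, same results).

-- ===== PORT A =====
-- recursive generator of A for a nonnegative count (fuel = the count n, exact for n ≥ 0)
def kpermAgo (items : List Int) : Nat → List (List Int)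
  | 0 => [[]]
  | m + 1 =>
      (List.range items.length).flatMap (fun i =>
        (kpermAgo items m).filterMap (fun ss =>
          if items.getD i 0 ∈ ss then none else some (items.getD i 0 :: ss)))

def k_permutations (items : List Int) (n : Int) : List (List Int) :=
  if n = 0 then [[]]
  else
    (List.range items.length).flatMap (fun i =>
      (kpermAgo items (n - 1).toNat).filterMap (fun ss =>
        if items.getD i 0 ∈ ss then none else some (items.getD i 0 :: ss)))

-- ===== PORT B =====
-- B's extend(used, k): only values not yet used may start a suffix; k ≤ 0 handled as in B
def kpermBgo (items : List Int) (used : PySem.Set Int) (k : Int) : List (List Int) :=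
  if k = 0 then [[]]
  else if 0 < k then
    items.flatMap (fun x =>
      if PySem.Set.contains used x then []
      else (kpermBgo items (PySem.Set.add used x) (k - 1)).map (fun tail => x :: tail))
  else []
termination_by k.toNat
decreasing_by omega

def k_permutations_alt (items : List Int) (n : Int) : List (List Int) :=
  kpermBgo items PySem.Set.empty n

-- ===== PRECONDITION & SPEC =====
-- Pre_ excludes n < 0 with nonempty items: there A recurses without bound (RecursionError),
-- returning no value; B returns [] on those inputs.
def Pre_k_permutations (items : List Int) (n : Int) : Prop := 0 ≤ n ∨ items = []
instance (items : List Int) (n : Int) : Decidable (Pre_k_permutations items n) := by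
  unfold Pre_k_permutations; infer_instance

def pvWitness_k_permutations : List Int × Int := ([1, 2, 3], 2)

def Spec_k_permutations (items : List Int) (n : Int) (out : List (List Int)) : Prop :=
  out = k_permutations_alt items n
instance (items : List Int) (n : Int) (out : List (List Int)) : Decidable (Spec_k_permutations items n out) := by
  unfold Spec_k_permutations; infer_instance

-- ===== CLAIM (what is proved, stated in full; the proofs are below) =====
def Claim_equal_k_permutations : Prop := ∀ (items : List Int) (n : Int),
  Dom_k_permutations items n → Pre_k_permutations items n →
  Spec_k_permutations items n (k_permutations items n)

-- ===== LEMMAS AND PROOFS =====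

-- A's "generate a suffix, then reject it if it contains items[i]" as filter-then-map
lemma filterMap_ite_cons (x : Int) (L : List (List Int)) :
    L.filterMap (fun ss => if x ∈ ss then none else some (x :: ss))
      = (L.filter (fun ss => !ss.contains x)).map (fun ss => x :: ss) := by
  induction L with
  | nil => rfl
  | cons s t ih =>
      by_cases h : x ∈ s <;>
        simp [h, ih]

-- the loop over indices of items is a loop over items
lemma flatMap_range_getD (items : List Int) (F : Int → List (List Int)) :
    (List.range items.length).flatMap (fun i => F (items.getD i 0)) = items.flatMap F := by
  induction items with
  | nil => rfl
  | cons a t ih =>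
      simp only [List.length_cons, List.range_succ_eq_map, List.flatMap_cons,
        List.flatMap_map, List.getD_cons_zero, List.getD_cons_succ]
      exact congrArg _ ih

-- main invariant: backtracking with a used-set = A's recursion filtered by disjointness from used
lemma kpermBgo_eq_filter (items : List Int) (m : Nat) :
    ∀ used : PySem.Set Int,
      kpermBgo items used (m : Int)
        = (kpermAgo items m).filter (fun ss => ss.all (fun y => !PySem.Set.contains used y)) := by
  induction m with
  | zero => intro used; rw [kpermBgo]; rfl
  | succ m ih =>
      intro used
      rw [kpermBgo]
      have h0 : ¬ ((m + 1 : Nat) : Int) = 0 := by omega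
      have h1 : (0 : Int) < ((m + 1 : Nat) : Int) := by omega
      have h2 : ((m + 1 : Nat) : Int) - 1 = (m : Int) := by omega
      simp only [h0, if_false, h1, if_true, h2, ih, kpermAgo]
      rw [flatMap_range_getD items (fun x =>
        (kpermAgo items m).filterMap (fun ss => if x ∈ ss then none else some (x :: ss)))]
      rw [List.filter_flatMap]
      refine (List.flatMap_congr (fun x hx => ?_)).symm
      rw [filterMap_ite_cons, List.filter_map]
      by_cases hu : x ∈ used
      · simp [hu]
      · simp only [hu, if_false, PySem.Set.contains_iff]
        congr 1
        rw [List.filter_filter]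
        apply List.filter_congr
        intro ss _
        rw [Bool.eq_iff_iff]
        simp only [Function.comp_apply, List.all_cons, Bool.and_eq_true, List.all_eq_true,
          PySem.Set.contains_eq_listContains, List.contains_eq_mem, Bool.not_eq_eq_eq_not,
          Bool.not_true, decide_eq_false_iff_not, PySem.Set.mem_add, not_or]
        constructor
        · rintro ⟨⟨-, hall⟩, hxs⟩ y hy
          exact ⟨hall y hy, fun e => hxs (e ▸ hy)⟩
        · intro h
          exact ⟨⟨hu, fun y hy => (h y hy).1⟩, fun hxs => (h x hxs).2 rfl⟩

theorem k_permutations_spec : Claim_equal_k_permutations := by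
  intro items n hdom hpre
  unfold Spec_k_permutations k_permutations k_permutations_alt
  by_cases h0 : n = 0
  · subst h0; rw [kpermBgo]; simp
  · by_cases hpos : 0 < n
    · have hn : n = (((n - 1).toNat : Nat) : Int) + 1 := by omega
      rw [kpermBgo, if_neg h0, if_pos hpos]
      simp only [h0, if_false]
      rw [flatMap_range_getD items (fun x =>
        (kpermAgo items (n - 1).toNat).filterMap (fun ss => if x ∈ ss then none else some (x :: ss)))]
      refine List.flatMap_congr (fun x hx => ?_)
      have hk : n - 1 = (((n - 1).toNat : Nat) : Int) := by omega
      rw [hk, kpermBgo_eq_filter]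
      have hadd : PySem.Set.add (PySem.Set.empty : PySem.Set Int) x = [x] := rfl
      rw [filterMap_ite_cons, hadd]
      congr 1
      apply List.filter_congr
      intro ss _
      rw [Bool.eq_iff_iff]
      simp only [PySem.Set.contains_eq_listContains, List.contains_eq_mem, Bool.not_eq_eq_eq_not,
        Bool.not_true, decide_eq_false_iff_not, List.all_eq_true, List.mem_singleton]
      exact ⟨fun h y hy e => h (e ▸ hy), fun h hx2 => h x hx2 rfl⟩
    · have hneg : n < 0 := by omega
      have hitems : items = [] := by
        rcases hpre with h | h
        · omega
        · exact h
      subst hitems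
      rw [kpermBgo, if_neg h0, if_neg (by omega : ¬ (0:Int) < n)]
      simp [h0]
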